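-- pv_equiv track=rewrite | github.com/andy-ahmedov/sayit | src/pdf_tts_ru/page_ranges.py | format_page_label
-- ===== SOURCE A (Python) =====
-- def coalesce_page_ranges(pages: list[int]) -> list[tuple[int, int]]:
--     """Coalesce sorted page numbers into inclusive ranges."""
--
--     if not pages:
--         raise ValueError("pages must not be empty")
--
--     ordered = sorted(set(pages))
--     if ordered[0] < 1:
--         raise ValueError("page numbers must be positive")
--
--     ranges: list[tuple[int, int]] = []
--     start = ordered[0]
--     end = ordered[0]
--
--     for page in ordered[1:]:
--         if page == end + 1:
--             end = page
--             continue
--         ranges.append((start, end))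
--         start = end = page
--
--     ranges.append((start, end))
--     return ranges
--
-- def format_page_label(pages: list[int]) -> str:
--     """Format page numbers into a deterministic label suitable for filenames."""
--
--     parts: list[str] = []
--     for start, end in coalesce_page_ranges(pages):
--         if start == end:
--             parts.append(f"page_{start:04d}")
--         else:
--             parts.append(f"pages_{start:04d}-{end:04d}")
--
--     return "_".join(parts)
-- ===== SOURCE B (Python) =====
-- def format_page_label(pages):
--     if not pages:
--         raise ValueError("pages must not be empty")
--     present = set(pages)
--     if min(present) < 1:
--         raise ValueError("page numbers must be positive")
--     # Boundary detection via set membership: p starts a run iff p-1 is absent,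
--     # p ends a run iff p+1 is absent; sorted starts pair up with sorted ends.
--     starts = sorted(p for p in present if p - 1 not in present)
--     ends = sorted(p for p in present if p + 1 not in present)
--     return "_".join(
--         f"page_{a:04d}" if a == b else f"pages_{a:04d}-{b:04d}"
--         for a, b in zip(starts, ends)
--     )
-- ===== Notes on version B (the rewrite author's own statement) =====
-- stated objective: alternative
-- what changed: Instead of sorting and scanning adjacent elements with a start/end accumulator, B detects run boundaries purely by set membership (p is a run start iff p-1 is absent, a run end iff p+1 is absent), sorts the two boundary lists independently and zips them into ranges.
import Mathlib
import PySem

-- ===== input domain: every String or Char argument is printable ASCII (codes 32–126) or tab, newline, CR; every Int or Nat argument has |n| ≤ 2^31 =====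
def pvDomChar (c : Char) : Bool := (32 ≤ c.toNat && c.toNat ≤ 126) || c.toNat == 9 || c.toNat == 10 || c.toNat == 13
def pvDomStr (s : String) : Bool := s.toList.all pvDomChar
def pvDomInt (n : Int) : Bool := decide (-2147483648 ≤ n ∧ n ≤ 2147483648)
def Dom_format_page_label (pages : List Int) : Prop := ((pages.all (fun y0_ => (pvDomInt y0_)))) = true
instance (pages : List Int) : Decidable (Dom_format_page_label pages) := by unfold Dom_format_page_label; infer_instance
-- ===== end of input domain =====

-- B replaces A's sorted-adjacency accumulator scan by set-membership boundary detection: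
-- p starts a run iff p-1 ∉ set, ends one iff p+1 ∉ set; sorted starts zip with sorted ends.

-- ===== PORT A =====
-- f"{n:04d}" (n here is a positive page number; zfill is Python-exact incl. the sign rule)
def pvPad4 (n : Int) : String := PySem.Str.zfill (PySem.Int.toStr n) 4

-- body of A's for-loop over coalesce_page_ranges
def pvRangeLabel (se : Int × Int) : String :=
  if se.1 = se.2 then "page_" ++ pvPad4 se.1
  else "pages_" ++ pvPad4 se.1 ++ "-" ++ pvPad4 se.2

-- body of the loop in coalesce_page_ranges (state: (ranges, start, end))
def pvStep (acc : List (Int × Int) × Int × Int) (page : Int) : List (Int × Int) × Int × Int :=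
  if page = acc.2.2 + 1 then (acc.1, acc.2.1, page)
  else (acc.1 ++ [(acc.2.1, acc.2.2)], page, page)

def format_page_label (pages : List Int) : String :=
  let ordered := PySem.List.sorted (PySem.Set.ofList pages) (fun x => x) false
  match ordered with
  | [] => ""          -- raise ValueError("pages must not be empty"): outside Pre_
  | h :: t =>
    if h < 1 then ""  -- raise ValueError("page numbers must be positive"): outside Pre_
    else
      let st := t.foldl pvStep ([], h, h)
      let ranges := st.1 ++ [(st.2.1, st.2.2)]
      PySem.Str.join "_" (ranges.map pvRangeLabel)

-- ===== PORT B =====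
-- body of B's joined generator: format one (start, end) pair
def pvBoundLabel (ab : Int × Int) : String :=
  if ab.1 = ab.2 then "page_" ++ pvPad4 ab.1
  else "pages_" ++ pvPad4 ab.1 ++ "-" ++ pvPad4 ab.2

def format_page_label_alt (pages : List Int) : String :=
  match pages with
  | [] => ""          -- raise ValueError("pages must not be empty"): outside Pre_
  | _ :: _ =>
    let present := PySem.Set.ofList pages
    match PySem.List.min? present (fun x => x) with
    | none => ""      -- unreachable: present is non-empty
    | some m =>
      if m < 1 then ""  -- raise ValueError("page numbers must be positive"): outside Pre_
      else
        let starts := PySem.List.sorted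
          (present.filter (fun p => !(PySem.Set.contains present (p - 1)))) (fun x => x) false
        let ends := PySem.List.sorted
          (present.filter (fun p => !(PySem.Set.contains present (p + 1)))) (fun x => x) false
        PySem.Str.join "_" ((starts.zip ends).map pvBoundLabel)

-- ===== PRECONDITION & SPEC =====
-- Pre_ excludes exactly the inputs on which A raises ValueError: the empty list and lists
-- containing a page number < 1.
def Pre_format_page_label (pages : List Int) : Prop :=
  pages ≠ [] ∧ ∀ p ∈ pages, 1 ≤ p
instance (pages : List Int) : Decidable (Pre_format_page_label pages) := by
  unfold Pre_format_page_label; infer_instance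

def pvWitness_format_page_label : List Int := [3, 1, 2, 7, 5, 8, 3]

def Spec_format_page_label (pages : List Int) (out : String) : Prop := out = format_page_label_alt pages
instance (pages : List Int) (out : String) : Decidable (Spec_format_page_label pages out) := by unfold Spec_format_page_label; infer_instance

-- ===== CLAIM (what is proved, stated in full; the proofs are below) =====
def Claim_equal_format_page_label : Prop := ∀ (pages : List Int), Dom_format_page_label pages → Pre_format_page_label pages → Spec_format_page_label pages (format_page_label pages)

-- ===== LEMMAS AND PROOFS =====

-- reference decomposition: the maximal consecutive runs of h :: t
def pvRuns : Int → List Int → List (List Int)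
  | h, [] => [[h]]
  | h, p :: t =>
    if p = h + 1 then
      match pvRuns p t with
      | [] => [[h]]                       -- unreachable
      | r :: rest => (h :: r) :: rest
    else [h] :: pvRuns p t

-- reference form of A's coalescing loop
def pvF : Int → Int → List Int → List (Int × Int)
  | s, e, [] => [(s, e)]
  | s, e, p :: t => if p = e + 1 then pvF s p t else (s, e) :: pvF p p t

-- one-step equation: runs of a two-or-more element list
lemma pvRuns_cons_eq (h p : Int) (t : List Int) (r : List Int) (rest : List (List Int))
    (hr : pvRuns p t = (p :: r) :: rest) :
    pvRuns h (p :: t)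
      = if p = h + 1 then (h :: p :: r) :: rest else [h] :: (p :: r) :: rest := by
  conv_lhs => rw [pvRuns]; rw [hr]

lemma pvRuns_shape (t : List Int) (h : Int) :
    ∃ r rest, pvRuns h t = (h :: r) :: rest := by
  induction t generalizing h with
  | nil => exact ⟨[], [], rfl⟩
  | cons p t ih =>
    obtain ⟨r, rest, hr⟩ := ih p
    by_cases hc : p = h + 1
    · exact ⟨p :: r, rest, by rw [pvRuns_cons_eq h p t r rest hr, if_pos hc]⟩
    · exact ⟨[], (p :: r) :: rest, by rw [pvRuns_cons_eq h p t r rest hr, if_neg hc]⟩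

-- A's foldl accumulates pvF
lemma pvFold_spec (t : List Int) (rs : List (Int × Int)) (s e : Int) :
    (t.foldl pvStep (rs, s, e)).1
      ++ [((t.foldl pvStep (rs, s, e)).2.1, (t.foldl pvStep (rs, s, e)).2.2)]
    = rs ++ pvF s e t := by
  induction t generalizing rs s e with
  | nil => simp [pvF]
  | cons p t ih =>
    simp only [List.foldl_cons, pvStep, pvF]
    by_cases hc : p = e + 1
    · simp only [if_pos hc]
      exact ih rs s p
    · simp only [if_neg hc]
      rw [ih (rs ++ [(s, e)]) p p, List.append_assoc]
      rfl

-- pvF in terms of the runs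
lemma pvF_runs (t : List Int) (s e : Int) :
    pvF s e t
      = match pvRuns e t with
        | [] => []
        | r :: rest => (s, r.getLastD 0) :: rest.map (fun r => (r.headD 0, r.getLastD 0)) := by
  induction t generalizing s e with
  | nil => simp [pvF, pvRuns]
  | cons p t ih =>
    obtain ⟨r, rest, hr⟩ := pvRuns_shape t p
    rw [pvF, pvRuns_cons_eq e p t r rest hr]
    by_cases hc : p = e + 1
    · rw [if_pos hc, if_pos hc, ih s p, hr]
      simp
    · rw [if_neg hc, if_neg hc, ih p p, hr]
      simp

-- assembled: A's range pairs at s = e = h are exactly (head, last) of each run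
lemma pvF_diag (t : List Int) (h : Int) :
    pvF h h t = (pvRuns h t).map (fun r => (r.headD 0, r.getLastD 0)) := by
  obtain ⟨r, rest, hr⟩ := pvRuns_shape t h
  rw [pvF_runs, hr]
  simp

-- B side: filtering a strictly increasing suffix of M by "p-1 ∉ M" yields the run heads
-- (the first head h only when h-1 ∉ M)
lemma pvStarts_filter (M : List Int) (hM : M.Pairwise (· < ·)) :
    ∀ (h : Int) (t : List Int), (h :: t) <:+ M →
      (h :: t).filter (fun p => decide ((p - 1) ∉ M)) =
        (if (h - 1) ∈ M then [] else [h]) ++ ((pvRuns h t).map (fun r => r.headD 0)).tail := by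
  intro h t
  induction t generalizing h with
  | nil =>
    intro _
    by_cases hm : (h - 1) ∈ M <;> simp [pvRuns, List.filter, hm]
  | cons p t ih =>
    intro hsuf
    have hsuf' : (p :: t) <:+ M := (List.suffix_cons h (p :: t)).trans hsuf
    have hIH := ih p hsuf'
    obtain ⟨r, rest, hr⟩ := pvRuns_shape t p
    obtain ⟨pre, hpre⟩ := hsuf
    have hchain : (h :: p :: t).Pairwise (· < ·) :=
      (List.pairwise_append.mp (hpre ▸ hM)).2.1
    have hpair : ∀ x ∈ pre, ∀ y ∈ h :: p :: t, x < y :=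
      (List.pairwise_append.mp (hpre ▸ hM)).2.2
    have hhp : h < p := (List.pairwise_cons.mp hchain).1 p (by simp)
    rw [pvRuns_cons_eq h p t r rest hr]
    by_cases hc : p = h + 1
    · -- h's successor is consecutive: p - 1 = h ∈ M, so p is not a start
      have hpm : (p - 1) ∈ M := by
        have : h ∈ M := by rw [← hpre]; simp
        simpa [hc] using this
      rw [hr, if_pos hpm] at hIH
      rw [if_pos hc, List.filter_cons, hIH]
      simp only [List.map_cons, List.tail_cons, List.nil_append]
      by_cases hm : (h - 1) ∈ M <;> simp [hm]
    · -- a gap: p ≥ h + 2, so p - 1 ∉ M and p starts a new run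
      have hpm : (p - 1) ∉ M := by
        intro hmem
        rw [← hpre] at hmem
        rcases List.mem_append.mp hmem with hx | hx
        · have := hpair _ hx h (by simp)
          omega
        · rcases List.mem_cons.mp hx with h1 | hx
          · omega
          · rcases List.mem_cons.mp hx with h1 | hx
            · omega
            · have := (List.pairwise_cons.mp ((List.pairwise_cons.mp hchain).2)).1 _ hx
              omega
      rw [hr, if_neg hpm] at hIH
      rw [if_neg hc, List.filter_cons, hIH]
      simp only [List.map_cons, List.tail_cons]
      by_cases hm : (h - 1) ∈ M <;> simp [hm]

-- B side: filtering a strictly increasing suffix of M by "p+1 ∉ M" yields the run lasts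
lemma pvEnds_filter (M : List Int) (hM : M.Pairwise (· < ·)) :
    ∀ (h : Int) (t : List Int), (h :: t) <:+ M →
      (h :: t).filter (fun p => decide ((p + 1) ∉ M)) =
        (pvRuns h t).map (fun r => r.getLastD 0) := by
  intro h t
  induction t generalizing h with
  | nil =>
    intro hsuf
    obtain ⟨pre, hpre⟩ := hsuf
    have hm : (h + 1) ∉ M := by
      intro hmem
      rw [← hpre] at hmem
      rcases List.mem_append.mp hmem with hx | hx
      · have := (List.pairwise_append.mp (hpre ▸ hM)).2.2 _ hx h (by simp)
        omega
      · simp at hx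
    simp [pvRuns, List.filter, hm]
  | cons p t ih =>
    intro hsuf
    have hsuf' : (p :: t) <:+ M := (List.suffix_cons h (p :: t)).trans hsuf
    have hIH := ih p hsuf'
    obtain ⟨r, rest, hr⟩ := pvRuns_shape t p
    obtain ⟨pre, hpre⟩ := hsuf
    have hchain : (h :: p :: t).Pairwise (· < ·) :=
      (List.pairwise_append.mp (hpre ▸ hM)).2.1
    have hhp : h < p := (List.pairwise_cons.mp hchain).1 p (by simp)
    rw [pvRuns_cons_eq h p t r rest hr]
    by_cases hc : p = h + 1
    · -- h is followed by h+1 ∈ M: h is not a run end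
      have hm : (h + 1) ∈ M := by
        have : p ∈ M := by rw [← hpre]; simp
        simpa [hc] using this
      rw [hr] at hIH
      rw [if_pos hc, List.filter_cons, hIH]
      simp [hm]
    · -- a gap after h: h + 1 ∉ M, h ends its run
      have hm : (h + 1) ∉ M := by
        intro hmem
        rw [← hpre] at hmem
        rcases List.mem_append.mp hmem with hx | hx
        · have := (List.pairwise_append.mp (hpre ▸ hM)).2.2 _ hx h (by simp)
          omega
        · rcases List.mem_cons.mp hx with h1 | hx
          · omega
          · rcases List.mem_cons.mp hx with h1 | hx
            · omega
            · have := (List.pairwise_cons.mp ((List.pairwise_cons.mp hchain).2)).1 _ hx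
              omega
      rw [hr] at hIH
      rw [if_neg hc, List.filter_cons, hIH]
      simp [hm]

-- ===== VERDICT (by name: the statement is the Claim_ definition above) =====
theorem format_page_label_spec : Claim_equal_format_page_label := by
  intro pages _ hpre
  obtain ⟨hne, hpos⟩ := hpre
  unfold Spec_format_page_label format_page_label format_page_label_alt
  cases pages with
  | nil => exact absurd rfl hne
  | cons p0 ps =>
  have hMpw' := PySem.List.sorted_ofList_pairwise_lt (xs := p0 :: ps)
  cases hord : PySem.List.sorted (PySem.Set.ofList (p0 :: ps)) (fun x => x) false with
  | nil =>
    have hE : PySem.Set.ofList (p0 :: ps) = [] := (PySem.List.sorted_eq_nil_iff _ _ _).mp hord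
    have hp : p0 ∈ PySem.Set.ofList (p0 :: ps) := (PySem.Set.mem_ofList _ _).mpr (by simp)
    rw [hE] at hp
    simp at hp
  | cons h t =>
    have hMpw : (h :: t).Pairwise (· < ·) := hord ▸ hMpw'
    -- membership transfer between the set and M = h :: t
    have hmemM : ∀ x, x ∈ h :: t ↔ x ∈ (p0 :: ps) := by
      intro x
      rw [← hord, PySem.List.mem_sorted _ _ _ _, PySem.Set.mem_ofList _ _]
    have hh1 : 1 ≤ h := hpos h ((hmemM h).mp (by simp))
    have hlt : ¬ h < 1 := by omega
    -- B's min is h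
    have hmne : PySem.List.min? (PySem.Set.ofList (p0 :: ps)) (fun x => x) ≠ none := by
      intro hE
      rw [PySem.List.min?_eq_none_iff] at hE
      have hp : p0 ∈ PySem.Set.ofList (p0 :: ps) := (PySem.Set.mem_ofList _ _).mpr (by simp)
      rw [hE] at hp
      simp at hp
    cases hmin : PySem.List.min? (PySem.Set.ofList (p0 :: ps)) (fun x => x) with
    | none => exact absurd hmin hmne
    | some m =>
      have hmh : m = h := by
        have h1 : m ∈ PySem.Set.ofList (p0 :: ps) := PySem.List.min?_mem hmin
        have h2 : h ≤ m := PySem.List.key_head_sorted_le _ _ hord m h1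
        have h3 : m ≤ h :=
          PySem.List.min?_isMin hmin h
            ((PySem.List.mem_sorted _ _ _ _).mp (hord ▸ (by simp : h ∈ h :: t)))
        omega
      dsimp only
      rw [hmin]
      dsimp only
      rw [if_neg hlt, if_neg (by omega : ¬ m < 1)]
      -- identify B's two sorted filters with filters of M
      have hMperm : (h :: t).Perm (PySem.Set.ofList (p0 :: ps)) := hord ▸ PySem.List.sorted_perm _ _ _
      have hfilt : ∀ (f : Int → Int),
          PySem.List.sorted
              ((PySem.Set.ofList (p0 :: ps)).filter
                (fun p => !(PySem.Set.contains (PySem.Set.ofList (p0 :: ps)) (f p)))) (fun x => x) false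
            = (h :: t).filter (fun p => decide ((f p) ∉ h :: t)) := by
        intro f
        have hcongr : (h :: t).filter (fun p => decide ((f p) ∉ h :: t))
            = (h :: t).filter (fun p => !(PySem.Set.contains (PySem.Set.ofList (p0 :: ps)) (f p))) := by
          apply List.filter_congr
          intro x _
          have hcont : PySem.Set.contains (PySem.Set.ofList (p0 :: ps)) (f x) = true
              ↔ f x ∈ h :: t := by
            rw [PySem.Set.contains_iff _ _, PySem.Set.mem_ofList _ _]
            exact (hmemM (f x)).symm
          by_cases hfx : f x ∈ h :: t
          · rw [hcont.mpr hfx]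
            simp [hfx]
          · rw [Bool.eq_false_iff.mpr (fun hc => hfx (hcont.mp hc))]
            simp [hfx]
        apply PySem.List.sorted_eq_of_perm_of_pairwise_lt
        · rw [hcongr]
          exact hMperm.filter _
        · rw [hcongr]
          exact List.Pairwise.filter _ hMpw
      have hh1M : (h - 1) ∉ h :: t := by
        intro hmem
        rcases List.mem_cons.mp hmem with h1 | h1
        · omega
        · have := (List.pairwise_cons.mp hMpw).1 _ h1
          omega
      have hstart := pvStarts_filter (h :: t) hMpw h t (List.suffix_refl _)
      rw [if_neg hh1M] at hstart
      have hend := pvEnds_filter (h :: t) hMpw h t (List.suffix_refl _)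
      obtain ⟨r, rest, hr⟩ := pvRuns_shape t h
      have hheads : [h] ++ ((pvRuns h t).map (fun r => r.headD 0)).tail
          = (pvRuns h t).map (fun r => r.headD 0) := by
        rw [hr]; simp
      have hstarts := hfilt (fun p => p - 1)
      rw [hstart, hheads] at hstarts
      have hends := hfilt (fun p => p + 1)
      rw [hend] at hends
      rw [hstarts, hends]
      rw [pvFold_spec t [] h h, List.nil_append, pvF_diag, List.zip_map']
      rfl
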